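-- pv_equiv track=rewrite | github.com/riccardomassi/TheSpoon | BENCHMARK/benchmark.py | passOnResults
-- ===== SOURCE A (Python) =====
-- def passOnResults(list_a, list_b, x) -> int:
--     count = 0
--     iter = 0
--     for element in list_a:
--         count = count +1
--         if element in list_b:
--             iter = iter +1
--             if iter == x:
--                 break
--
--     return count,iter
-- ===== SOURCE B (Python) =====
-- def passOnResults(list_a, list_b, x) -> int:
--     bset = set(list_b)
--     matches = [i for i, e in enumerate(list_a) if e in bset]
--     if 1 <= x <= len(matches):
--         return matches[x - 1] + 1, x
--     return len(list_a), len(matches)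
-- ===== Notes on version B (the rewrite author's own statement) =====
-- stated objective: faster
-- what changed: Instead of one fused loop with an early break and a linear 'in list_b' test per element, B turns list_b into a set once and builds the list of match positions in one pass, then selects by indexing: the x-th match position gives count, otherwise the full length and total match count.
import Mathlib
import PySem

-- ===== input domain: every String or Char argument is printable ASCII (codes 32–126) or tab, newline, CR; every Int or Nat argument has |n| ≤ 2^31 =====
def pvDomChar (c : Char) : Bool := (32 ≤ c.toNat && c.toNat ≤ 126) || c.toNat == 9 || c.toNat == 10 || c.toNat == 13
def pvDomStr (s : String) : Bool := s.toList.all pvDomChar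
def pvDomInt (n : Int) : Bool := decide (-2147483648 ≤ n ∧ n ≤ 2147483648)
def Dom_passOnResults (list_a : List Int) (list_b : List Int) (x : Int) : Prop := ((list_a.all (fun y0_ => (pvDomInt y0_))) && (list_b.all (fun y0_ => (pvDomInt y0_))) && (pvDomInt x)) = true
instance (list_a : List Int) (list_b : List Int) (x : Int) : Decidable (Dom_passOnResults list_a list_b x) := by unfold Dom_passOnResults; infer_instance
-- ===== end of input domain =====

-- B builds the list of match positions in one pass (membership via a set of list_b) and then selects by
-- indexing, instead of A's fused counting loop with a linear membership test per element; same values everywhere.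

-- ===== PORT A =====
-- the for-loop of A, with its two accumulators `count` and `iter`; the `break` is the early return
def pvLoopA (list_b : List Int) (x : Int) : List Int → Int → Int → Int × Int
  | [], count, iter => (count, iter)
  | e :: rest, count, iter =>
    if list_b.contains e then
      if iter + 1 = x then (count + 1, iter + 1)
      else pvLoopA list_b x rest (count + 1) (iter + 1)
    else pvLoopA list_b x rest (count + 1) iter

def passOnResults (list_a : List Int) (list_b : List Int) (x : Int) : Int × Int :=
  pvLoopA list_b x list_a 0 0

-- ===== PORT B =====
-- the comprehension `[i for i, e in enumerate(list_a) if e in bset]` as a one-pass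
-- recursion carrying the enumerate index (set membership = membership in the distinct elements)
def pvMatchIdx (bset : PySem.Set Int) : List Int → Int → List Int
  | [], _ => []
  | e :: rest, i =>
    if bset.contains e then i :: pvMatchIdx bset rest (i + 1)
    else pvMatchIdx bset rest (i + 1)

def passOnResults_alt (list_a : List Int) (list_b : List Int) (x : Int) : Int × Int :=
  let bset := PySem.Set.ofList list_b
  let ms := pvMatchIdx bset list_a 0
  if 1 ≤ x ∧ x ≤ (ms.length : Int) then
    (ms.getD (x - 1).toNat 0 + 1, x)
  else
    ((list_a.length : Int), (ms.length : Int))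

-- ===== PRECONDITION & SPEC =====
def Spec_passOnResults (list_a : List Int) (list_b : List Int) (x : Int) (out : Int × Int) : Prop := out = passOnResults_alt list_a list_b x
instance (list_a : List Int) (list_b : List Int) (x : Int) (out : Int × Int) : Decidable (Spec_passOnResults list_a list_b x out) := by unfold Spec_passOnResults; infer_instance

-- ===== CLAIM (what is proved, stated in full; the proofs are below) =====
def Claim_equal_passOnResults : Prop := ∀ (list_a : List Int) (list_b : List Int) (x : Int), Dom_passOnResults list_a list_b x → Spec_passOnResults list_a list_b x (passOnResults list_a list_b x)

-- ===== LEMMAS AND PROOFS =====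

-- PySem.Set membership agrees with list membership
theorem pvSet_contains (lb : List Int) (e : Int) :
    (PySem.Set.ofList lb).contains e = lb.contains e := by
  simp [PySem.Set.mem_ofList]

-- the match-index list with start index i is the start-0 list shifted by i
theorem pvMatchIdx_shift (bset : PySem.Set Int) (la : List Int) (i : Int) :
    pvMatchIdx bset la i = (pvMatchIdx bset la 0).map (· + i) := by
  induction la generalizing i with
  | nil => simp [pvMatchIdx]
  | cons e rest ih =>
    simp only [pvMatchIdx]
    rw [ih (i + 1), ih (0 + 1)]
    by_cases h : e ∈ bset <;>
      simp [h, List.map_map] <;> intro a _ <;> omega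

-- A's loop shifts with its accumulators
theorem pvLoopA_shift (lb : List Int) (la : List Int) (x c i : Int) :
    pvLoopA lb x la c i =
      ((pvLoopA lb (x - i) la 0 0).1 + c, (pvLoopA lb (x - i) la 0 0).2 + i) := by
  induction la generalizing x c i with
  | nil => simp [pvLoopA]
  | cons e rest ih =>
    by_cases h : e ∈ lb
    · by_cases hx : i + 1 = x
      · have hx' : (1 : Int) = x - i := by omega
        simp [pvLoopA, h, hx, ← hx', Prod.ext_iff]
        omega
      · have hx' : ¬ ((1 : Int) = x - i) := by omega
        simp only [pvLoopA, List.contains_eq_mem, h, decide_true, if_true, if_neg hx, if_neg hx',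
          zero_add]
        rw [ih x (c + 1) (i + 1), ih (x - i) 1 1]
        have harg : x - i - 1 = x - (i + 1) := by omega
        rw [harg]
        simp only [Prod.ext_iff]
        constructor <;> first | trivial | omega
    · simp only [pvLoopA, List.contains_eq_mem, h, decide_false, Bool.false_eq_true, if_false,
        zero_add]
      rw [ih x (c + 1) i, ih (x - i) 1 0]
      have harg : x - i - 0 = x - i := by omega
      rw [harg]
      simp only [Prod.ext_iff]
      constructor <;> omega

-- getD of a shifted list, in bounds
theorem pvGetD_map_add_one (l : List Int) (k : Nat) (hk : k < l.length) :
    (l.map (· + 1)).getD k 0 = l.getD k 0 + 1 := by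
  rw [List.getD_eq_getElem _ _ (by simpa using hk), List.getD_eq_getElem _ _ hk]
  simp

-- core equivalence, by induction on list_a with x generalized
theorem pvMain (lb : List Int) (la : List Int) (x : Int) :
    passOnResults la lb x = passOnResults_alt la lb x := by
  induction la generalizing x with
  | nil =>
    simp only [passOnResults, passOnResults_alt, pvLoopA, pvMatchIdx]
    simp
    omega
  | cons e rest ih =>
    by_cases h : e ∈ lb
    · have hc : lb.contains e = true := by simpa using h
      have hc' : (PySem.Set.ofList lb).contains e = true := by
        rw [pvSet_contains]; exact hc
      have hms : pvMatchIdx (PySem.Set.ofList lb) (e :: rest) 0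
          = 0 :: (pvMatchIdx (PySem.Set.ofList lb) rest 0).map (· + 1) := by
        simp only [pvMatchIdx, hc', if_true, zero_add]
        rw [pvMatchIdx_shift _ rest 1]
      by_cases hx : x = 1
      · subst hx
        simp only [passOnResults, passOnResults_alt, pvLoopA, hc, if_true, zero_add,
          hms]
        simp
      · have h1 : ¬ ((1 : Int) = x) := by omega
        have lhs : passOnResults (e :: rest) lb x
            = ((passOnResults rest lb (x - 1)).1 + 1, (passOnResults rest lb (x - 1)).2 + 1) := by
          simp only [passOnResults, pvLoopA, hc, if_true, zero_add, if_neg h1]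
          rw [pvLoopA_shift lb rest x 1 1]
        rw [lhs, ih (x - 1)]
        simp only [passOnResults_alt, hms]
        set ms := pvMatchIdx (PySem.Set.ofList lb) rest 0 with hms'
        by_cases hcnd : 1 ≤ x - 1 ∧ x - 1 ≤ (ms.length : Int)
        · have hcnd2 : 1 ≤ x ∧ x ≤ (((0 : Int) :: ms.map (· + 1)).length : Int) := by
            simp only [List.length_cons, List.length_map]; push_cast; omega
          rw [if_pos hcnd, if_pos hcnd2]
          have hk : (x - 1).toNat = (x - 1 - 1).toNat + 1 := by omega
          have hlt : (x - 1 - 1).toNat < ms.length := by omega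
          rw [hk]
          simp only [List.getD_cons_succ]
          rw [pvGetD_map_add_one ms _ hlt]
          simp only [Prod.ext_iff]
          constructor <;> first | trivial | omega
        · have hcnd2 : ¬ (1 ≤ x ∧ x ≤ (((0 : Int) :: ms.map (· + 1)).length : Int)) := by
            simp only [List.length_cons, List.length_map]; push_cast; omega
          rw [if_neg hcnd, if_neg hcnd2]
          simp only [List.length_cons, List.length_map, List.length_cons, Prod.ext_iff]
          push_cast
          constructor <;> omega
    · have hc : lb.contains e = false := by simpa using h
      have hc' : (PySem.Set.ofList lb).contains e = false := by
        rw [pvSet_contains]; exact hc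
      have hms : pvMatchIdx (PySem.Set.ofList lb) (e :: rest) 0
          = (pvMatchIdx (PySem.Set.ofList lb) rest 0).map (· + 1) := by
        simp only [pvMatchIdx, hc', Bool.false_eq_true, if_false, zero_add]
        rw [pvMatchIdx_shift _ rest 1]
      have lhs : passOnResults (e :: rest) lb x
          = ((passOnResults rest lb x).1 + 1, (passOnResults rest lb x).2) := by
        simp only [passOnResults, pvLoopA, hc, Bool.false_eq_true, if_false, zero_add]
        rw [pvLoopA_shift lb rest x 1 0]
        norm_num
      rw [lhs, ih x]
      simp only [passOnResults_alt, hms]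
      set ms := pvMatchIdx (PySem.Set.ofList lb) rest 0 with hms'
      by_cases hcnd : 1 ≤ x ∧ x ≤ (ms.length : Int)
      · have hcnd2 : 1 ≤ x ∧ x ≤ ((ms.map (· + 1)).length : Int) := by
          simpa using hcnd
        rw [if_pos hcnd, if_pos hcnd2]
        have hlt : (x - 1).toNat < ms.length := by omega
        rw [pvGetD_map_add_one ms _ hlt]
      · have hcnd2 : ¬ (1 ≤ x ∧ x ≤ ((ms.map (· + 1)).length : Int)) := by
          simpa using hcnd
        rw [if_neg hcnd, if_neg hcnd2]
        simp only [List.length_map, List.length_cons, Prod.ext_iff]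
        push_cast
        constructor <;> first | trivial | omega

-- ===== VERDICT (by name: the statement is the Claim_ definition above) =====
theorem passOnResults_spec : Claim_equal_passOnResults := by
  intro la lb x _
  exact pvMain lb la x
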